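-- pv_equiv track=rewrite | github.com/Mohido/FPC_Grading_Engine | main.py | progress_fulfilled
-- ===== SOURCE A (Python) =====
-- def progress_fulfilled(rowIDs, row_data):
--     accum = 0
--     for pt in row_data:
--         pt_score = pt[1]
--         while (pt_score >= 50):
--             accum += 1
--             pt_score -= 100
--     return accum >= 5
-- ===== SOURCE B (Python) =====
-- def progress_fulfilled(rowIDs, row_data):
--     return sum((s - 50) // 100 + 1 for _, s in row_data if s >= 50) >= 5
-- ===== Notes on version B (the rewrite author's own statement) =====
-- stated objective: simpler
-- what changed: Replaced the inner while-loop that counts one hit per 100 points by the closed-form per-element count (s-50)//100+1, summed in a one-line single pass.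
import Mathlib
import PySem

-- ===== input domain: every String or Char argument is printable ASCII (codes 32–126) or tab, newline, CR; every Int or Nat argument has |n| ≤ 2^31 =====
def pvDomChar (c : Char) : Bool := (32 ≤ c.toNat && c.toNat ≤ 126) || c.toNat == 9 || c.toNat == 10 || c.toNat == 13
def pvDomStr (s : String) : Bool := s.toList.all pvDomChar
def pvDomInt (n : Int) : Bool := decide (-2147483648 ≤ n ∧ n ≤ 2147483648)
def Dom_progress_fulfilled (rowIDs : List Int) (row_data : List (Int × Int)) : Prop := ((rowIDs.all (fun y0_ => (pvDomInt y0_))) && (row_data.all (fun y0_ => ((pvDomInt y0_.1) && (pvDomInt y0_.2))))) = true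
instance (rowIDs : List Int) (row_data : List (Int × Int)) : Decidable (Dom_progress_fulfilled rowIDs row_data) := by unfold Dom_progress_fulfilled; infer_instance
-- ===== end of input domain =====

-- B replaces A's inner while-loop (one iteration per 100 points) by the closed-form
-- per-element count (s-50)//100+1, summed in a single pass (objective: simpler).

-- ===== PORT A =====
-- the inner 'while pt_score >= 50: accum += 1; pt_score -= 100' loop of A
def pvWhileA (accum pt_score : Int) : Int :=
  if 50 ≤ pt_score then pvWhileA (accum + 1) (pt_score - 100) else accum
termination_by pt_score.toNat
decreasing_by omega

def progress_fulfilled (rowIDs : List Int) (row_data : List (Int × Int)) : Bool :=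
  decide (5 ≤ row_data.foldl (fun accum pt => pvWhileA accum pt.2) 0)

-- ===== PORT B =====
def progress_fulfilled_alt (rowIDs : List Int) (row_data : List (Int × Int)) : Bool :=
  decide (5 ≤ ((row_data.filter (fun pt => 50 ≤ pt.2)).map
                 (fun pt => PySem.Int.floordiv (pt.2 - 50) 100 + 1)).sum)

-- ===== PRECONDITION & SPEC =====
def Spec_progress_fulfilled (rowIDs : List Int) (row_data : List (Int × Int)) (out : Bool) : Prop := out = progress_fulfilled_alt rowIDs row_data
instance (rowIDs : List Int) (row_data : List (Int × Int)) (out : Bool) : Decidable (Spec_progress_fulfilled rowIDs row_data out) := by unfold Spec_progress_fulfilled; infer_instance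

-- ===== CLAIM (what is proved, stated in full; the proofs are below) =====
def Claim_equal_progress_fulfilled : Prop := ∀ (rowIDs : List Int) (row_data : List (Int × Int)), Dom_progress_fulfilled rowIDs row_data → Spec_progress_fulfilled rowIDs row_data (progress_fulfilled rowIDs row_data)

-- ===== LEMMAS AND PROOFS =====
-- closed-form count of one element
def pvCnt (s : Int) : Int := if 50 ≤ s then PySem.Int.floordiv (s - 50) 100 + 1 else 0

theorem pvWhileA_eq (accum pt_score : Int) : pvWhileA accum pt_score = accum + pvCnt pt_score := by
  induction accum, pt_score using pvWhileA.induct with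
  | case1 a s h ih =>
    rw [pvWhileA, if_pos h, ih]
    simp only [pvCnt, if_pos h]
    split_ifs with h2
    · rw [PySem.Int.floordiv_eq_ediv_of_pos (by omega : (0:Int) < 100),
          PySem.Int.floordiv_eq_ediv_of_pos (by omega : (0:Int) < 100)]
      omega
    · rw [PySem.Int.floordiv_eq_ediv_of_pos (by omega : (0:Int) < 100)]
      omega
  | case2 a s h =>
    rw [pvWhileA, if_neg h]
    simp only [pvCnt, if_neg h]
    omega

theorem foldl_whileA (l : List (Int × Int)) (a : Int) :
    l.foldl (fun accum pt => pvWhileA accum pt.2) a = a + (l.map (fun pt => pvCnt pt.2)).sum := by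
  induction l generalizing a with
  | nil => simp
  | cons x xs ih =>
    rw [List.foldl_cons, ih, pvWhileA_eq, List.map_cons, List.sum_cons]
    ring

theorem filter_map_sum (l : List (Int × Int)) :
    ((l.filter (fun pt => 50 ≤ pt.2)).map (fun pt => PySem.Int.floordiv (pt.2 - 50) 100 + 1)).sum
      = (l.map (fun pt => pvCnt pt.2)).sum := by
  induction l with
  | nil => simp
  | cons x xs ih =>
    rw [List.map_cons, List.sum_cons]
    by_cases h : 50 ≤ x.2
    · rw [List.filter_cons_of_pos (by simpa using h), List.map_cons, List.sum_cons, ih,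
          pvCnt, if_pos h]
    · rw [List.filter_cons_of_neg (by simpa using h), ih, pvCnt, if_neg h]
      ring

-- ===== VERDICT (by name: the statement is the Claim_ definition above) =====
theorem progress_fulfilled_spec : Claim_equal_progress_fulfilled := by
  intro rowIDs row_data _
  unfold Spec_progress_fulfilled progress_fulfilled progress_fulfilled_alt
  rw [foldl_whileA, filter_map_sum]
  simp
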